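-- pv_equiv track=rewrite | github.com/sriranganathan/Pragyan-CMS-Seeder | seeder.py | getPageName
-- ===== SOURCE A (Python) =====
-- def getPageName(page_title):
--     '''
--         Converts the given page_title to a valid
--         page name
--     '''
--
--     replace = {
--         '(': '_',
--         ')': '_',
--         '-': '_',
--         ' ': '_',
--         '\'': '',
--         '\n': '',
--         '\t': '',
--     }
--
--     page_name = page_title.lower()
--     page_name.strip()
--
--     for key in replace:
--         page_name = page_name.replace(key, replace[key])
--
--     return page_name
-- ===== SOURCE B (Python) =====
-- def getPageName(page_title):
--     '''
--         Converts the given page_title to a valid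
--         page name
--     '''
--     out = []
--     for ch in page_title:
--         c = ch.lower()
--         if c in ('(', ')', '-', ' '):
--             out.append('_')
--         elif c not in ("'", '\n', '\t'):
--             out.append(c)
--     return ''.join(out)
-- ===== Notes on version B (the rewrite author's own statement) =====
-- stated objective: simpler
-- what changed: Replaces the dict of seven sequential full-string .replace passes (and the discarded .strip()) with a single explicit loop that lowercases each character and appends an underscore, nothing, or the character itself via two tuple-membership tests, then joins.
import Mathlib
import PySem

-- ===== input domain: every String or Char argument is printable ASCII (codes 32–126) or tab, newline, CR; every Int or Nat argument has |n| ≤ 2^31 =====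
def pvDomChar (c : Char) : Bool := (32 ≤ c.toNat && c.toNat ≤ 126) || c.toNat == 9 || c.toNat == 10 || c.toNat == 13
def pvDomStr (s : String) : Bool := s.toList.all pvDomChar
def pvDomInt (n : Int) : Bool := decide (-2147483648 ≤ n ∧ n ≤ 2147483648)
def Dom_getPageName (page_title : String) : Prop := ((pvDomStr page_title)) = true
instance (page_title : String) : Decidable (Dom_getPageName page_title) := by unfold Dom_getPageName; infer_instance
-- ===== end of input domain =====

-- B replaces A's dict-driven seven sequential full-string .replace passes (and A's discarded
-- no-op .strip()) with a single explicit loop: lower each character and append '_', nothing,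
-- or the character via two membership tests, then join: simpler, same value.

-- ===== PORT A =====
def getPageName (page_title : String) : String :=
  let replace : PySem.Dict Char String :=
    PySem.Dict.ofList [('(', "_"), (')', "_"), ('-', "_"), (' ', "_"), ('\'', ""), ('\n', ""), ('\t', "")]
  let page_name := PySem.Str.lower page_title
  -- A's 'page_name.strip()' computes and discards the stripped value: no effect on the result
  let page_name := (PySem.Dict.keys replace).foldl
    (fun pn key => PySem.Str.replace pn (String.ofList [key]) (PySem.Dict.getD replace key ""))
    page_name
  page_name

-- ===== PORT B =====
def getPageName_alt (page_title : String) : String :=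
  String.ofList
    (page_title.toList.foldl
      (fun out ch =>
        let c := PySem.Chars.lowerChar ch
        if c = '(' ∨ c = ')' ∨ c = '-' ∨ c = ' ' then out ++ ['_']
        else if ¬ (c = '\'' ∨ c = '\n' ∨ c = '\t') then out ++ [c]
        else out)
      [])

-- ===== PRECONDITION & SPEC =====
def Spec_getPageName (page_title : String) (out : String) : Prop := out = getPageName_alt page_title
instance (page_title : String) (out : String) : Decidable (Spec_getPageName page_title out) := by unfold Spec_getPageName; infer_instance

-- ===== CLAIM =====
def Claim_equal_getPageName : Prop := ∀ (page_title : String), Dom_getPageName page_title → Spec_getPageName page_title (getPageName page_title)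

-- ===== LEMMAS AND PROOFS =====

-- the combined effect of the seven single-character replacements on one character
def phi (c : Char) : List Char :=
  if c = '(' ∨ c = ')' ∨ c = '-' ∨ c = ' ' then ['_']
  else if c = '\'' ∨ c = '\n' ∨ c = '\t' then []
  else [c]

-- single-character replacement is a flatMap over the characters
lemma replace_go_single (k : Char) (r : List Char) :
    ∀ (l : List Char) (fuel : Nat) (acc : List Char), l.length ≤ fuel →
      PySem.Chars.replace.go [k] r fuel l acc
        = acc.reverse ++ l.flatMap (fun c => if c = k then r else [c]) := by
  intro l
  induction l with
  | nil =>
      intro fuel acc _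
      cases fuel <;> simp [PySem.Chars.replace.go]
  | cons c t ih =>
      intro fuel acc h
      cases fuel with
      | zero => simp at h
      | succ m =>
          by_cases hc : c = k
          · subst hc
            have hp : List.isPrefixOf [c] (c :: t) = true := by
              simp [List.isPrefixOf]
            rw [PySem.Chars.replace.go]
            simp only [hp, if_true, List.length_cons, List.length_nil, List.drop_succ_cons,
              List.drop_zero]
            rw [ih m (r.reverse ++ acc) (Nat.le_of_succ_le_succ h)]
            simp
          · have hp : List.isPrefixOf [k] (c :: t) = false := by
              simp [List.isPrefixOf]
              intro h'; exact absurd h'.symm hc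
            rw [PySem.Chars.replace.go]
            simp only [hp, if_false, Bool.false_eq_true]
            rw [ih m (c :: acc) (Nat.le_of_succ_le_succ h)]
            simp [hc]

lemma replace_single (k : Char) (r : List Char) (l : List Char) :
    PySem.Chars.replace l [k] r = l.flatMap (fun c => if c = k then r else [c]) := by
  simp [PySem.Chars.replace, replace_go_single k r l l.length [] le_rfl]

-- the seven passes compose into phi, character by character
lemma chain_eq_phi (l : List Char) :
    PySem.Chars.replace (PySem.Chars.replace (PySem.Chars.replace (PySem.Chars.replace
      (PySem.Chars.replace (PySem.Chars.replace (PySem.Chars.replace l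
        ['('] ['_']) [')'] ['_']) ['-'] ['_']) [' '] ['_']) ['\''] []) ['\n'] []) ['\t'] []
    = l.flatMap phi := by
  simp only [replace_single, List.flatMap_assoc]
  apply List.flatMap_congr
  intro c _
  by_cases h1 : c = '(' <;> by_cases h2 : c = ')' <;> by_cases h3 : c = '-' <;>
    by_cases h4 : c = ' ' <;> by_cases h5 : c = '\'' <;> by_cases h6 : c = '\n' <;>
    by_cases h7 : c = '\t' <;>
    simp_all [phi]

lemma A_chain (pt : String) : getPageName pt =
    String.ofList (PySem.Chars.replace (PySem.Chars.replace (PySem.Chars.replace (PySem.Chars.replace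
      (PySem.Chars.replace (PySem.Chars.replace (PySem.Chars.replace (PySem.Chars.lower pt.toList)
        ['('] ['_']) [')'] ['_']) ['-'] ['_']) [' '] ['_']) ['\''] []) ['\n'] []) ['\t'] []) := by
  dsimp only [getPageName]
  have hkeys : (PySem.Dict.ofList [('(', "_"), (')', "_"), ('-', "_"), (' ', "_"), ('\'', ""), ('\n', ""), ('\t', "")] : PySem.Dict Char String).keys = ['(', ')', '-', ' ', '\'', '\n', '\t'] := by decide
  rw [hkeys]
  have e1 : (PySem.Dict.ofList [('(', "_"), (')', "_"), ('-', "_"), (' ', "_"), ('\'', ""), ('\n', ""), ('\t', "")] : PySem.Dict Char String).getD '(' "" = "_" := by decide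
  have e2 : (PySem.Dict.ofList [('(', "_"), (')', "_"), ('-', "_"), (' ', "_"), ('\'', ""), ('\n', ""), ('\t', "")] : PySem.Dict Char String).getD ')' "" = "_" := by decide
  have e3 : (PySem.Dict.ofList [('(', "_"), (')', "_"), ('-', "_"), (' ', "_"), ('\'', ""), ('\n', ""), ('\t', "")] : PySem.Dict Char String).getD '-' "" = "_" := by decide
  have e4 : (PySem.Dict.ofList [('(', "_"), (')', "_"), ('-', "_"), (' ', "_"), ('\'', ""), ('\n', ""), ('\t', "")] : PySem.Dict Char String).getD ' ' "" = "_" := by decide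
  have e5 : (PySem.Dict.ofList [('(', "_"), (')', "_"), ('-', "_"), (' ', "_"), ('\'', ""), ('\n', ""), ('\t', "")] : PySem.Dict Char String).getD '\'' "" = "" := by decide
  have e6 : (PySem.Dict.ofList [('(', "_"), (')', "_"), ('-', "_"), (' ', "_"), ('\'', ""), ('\n', ""), ('\t', "")] : PySem.Dict Char String).getD '\n' "" = "" := by decide
  have e7 : (PySem.Dict.ofList [('(', "_"), (')', "_"), ('-', "_"), (' ', "_"), ('\'', ""), ('\n', ""), ('\t', "")] : PySem.Dict Char String).getD '\t' "" = "" := by decide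
  have t1 : ("_" : String).toList = ['_'] := by decide
  have t2 : ("" : String).toList = [] := by decide
  simp only [List.foldl_cons, List.foldl_nil, e1, e2, e3, e4, e5, e6, e7,
    PySem.Str.replace, String.toList_ofList, PySem.Str.lower, t1, t2]

-- B's loop body appends exactly phi of the lowered character
lemma step_eq_phi (out : List Char) (ch : Char) :
    (let c := PySem.Chars.lowerChar ch
     if c = '(' ∨ c = ')' ∨ c = '-' ∨ c = ' ' then out ++ ['_']
     else if ¬ (c = '\'' ∨ c = '\n' ∨ c = '\t') then out ++ [c]
     else out)
    = out ++ phi (PySem.Chars.lowerChar ch) := by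
  dsimp only
  unfold phi
  split_ifs <;> simp_all

lemma B_flatMap (pt : String) :
    getPageName_alt pt = String.ofList ((pt.toList.map PySem.Chars.lowerChar).flatMap phi) := by
  dsimp only [getPageName_alt]
  congr 1
  have hf : (fun (out : List Char) (ch : Char) =>
       let c := PySem.Chars.lowerChar ch
       if c = '(' ∨ c = ')' ∨ c = '-' ∨ c = ' ' then out ++ ['_']
       else if ¬ (c = '\'' ∨ c = '\n' ∨ c = '\t') then out ++ [c]
       else out)
      = (fun out ch => out ++ (phi ∘ PySem.Chars.lowerChar) ch) := by
    funext out ch; exact step_eq_phi out ch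
  rw [hf, PySem.List.foldl_append_eq_flatMap]
  simp [List.flatMap_map, Function.comp_def]

-- ===== VERDICT =====
theorem getPageName_spec : Claim_equal_getPageName := by
  intro page_title _
  unfold Spec_getPageName
  rw [A_chain page_title, chain_eq_phi, B_flatMap]
  simp [PySem.Chars.lower]
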